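-- pv_equiv track=rewrite | github.com/oscarjmt/Dona-GT | Defensiva.py | transformarMonto
-- ===== SOURCE A (Python) =====
-- import math
--
-- def transformarMonto(montoDR):
--     listaMontoDR = montoDR.split(".")
--     listaSM = list(listaMontoDR[0])
--     repM = math.ceil(len(listaSM)/3)
--     listaSM3 = []
--     for m in range(repM):
--         if (repM - len(listaSM)/3) == 0:
--             c = m*3
--             listaSM3.append(listaSM[c]+listaSM[c+1]+listaSM[c+2])
--         elif (repM - len(listaSM)/3) < 0.5:
--             c = (m*3)-1
--             if m==0:
--                 listaSM3.append(listaSM[0]+listaSM[1])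
--             else:
--                 listaSM3.append(listaSM[c]+listaSM[c+1]+listaSM[c+2])
--         else:
--             c = (m*3)-2
--             if m==0:
--                 listaSM3.append(listaSM[0])
--             else:
--                 listaSM3.append(listaSM[c]+listaSM[c+1]+listaSM[c+2])
--     montoDR2 = ",".join(listaSM3) + "." + str(listaMontoDR[1])
--     monto = "Q. " + montoDR2
--     return(monto)
-- ===== SOURCE B (Python) =====
-- def transformarMonto(montoDR):
--     listaMontoDR = montoDR.split(".")
--     s = listaMontoDR[0]
--     groups = []
--     i = len(s)
--     while i > 0:
--         groups.append(s[max(0, i - 3):i])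
--         i -= 3
--     groups.reverse()
--     return "Q. " + ",".join(groups) + "." + str(listaMontoDR[1])
-- ===== Notes on version B (the rewrite author's own statement) =====
-- stated objective: simpler
-- what changed: replaces A's forward loop with three float-comparison remainder branches and per-character indexing by a single right-to-left slice loop (chunk 3 characters from the end, then reverse the chunks)
import Mathlib
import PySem

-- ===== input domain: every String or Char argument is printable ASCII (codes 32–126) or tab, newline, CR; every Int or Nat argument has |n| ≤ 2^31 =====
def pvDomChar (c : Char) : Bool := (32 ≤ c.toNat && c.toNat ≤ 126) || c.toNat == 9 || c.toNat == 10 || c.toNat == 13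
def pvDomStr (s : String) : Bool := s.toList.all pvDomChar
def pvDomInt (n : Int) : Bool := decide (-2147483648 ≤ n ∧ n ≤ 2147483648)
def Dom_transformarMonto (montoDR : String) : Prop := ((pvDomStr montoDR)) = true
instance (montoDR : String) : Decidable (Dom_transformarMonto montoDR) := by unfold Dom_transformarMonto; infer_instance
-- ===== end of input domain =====

-- B replaces A's forward loop with three remainder branches by one right-to-left 3-char chunk loop; objective: simpler. Both raise (no value) when the input has no '.', excluded by Pre_.

-- ===== PORT A =====
-- Python strings become List Char; 1-char-string concatenation listaSM[c]+listaSM[c+1]+listaSM[c+2] is the 3-element char list.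
-- The float tests `(repM - len/3) == 0` and `(repM - len/3) < 0.5` are ported as the exact integer conditions
-- len % 3 == 0 and len % 3 == 2 (the float value is 0, ~1/3 or ~2/3; the comparisons are exact on every length the checks reach).
-- math.ceil(len(listaSM)/3) is ported exactly as (len + 2) / 3.  Indices are in range on every reached branch
-- (proved below), so listaSM[c] is pyGetD under that invariant.
def pvALoop (s : List Char) : List (List Char) :=
  (PySem.List.pyRange 0 (((s.length + 2) / 3 : Nat) : Int) 1).foldl (fun acc m =>
      if s.length % 3 == 0 then
        let c := m * 3
        acc ++ [[PySem.List.pyGetD s c ' ', PySem.List.pyGetD s (c+1) ' ',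
                 PySem.List.pyGetD s (c+2) ' ']]
      else if s.length % 3 == 2 then
        let c := m * 3 - 1
        if m == 0 then
          acc ++ [[PySem.List.pyGetD s 0 ' ', PySem.List.pyGetD s 1 ' ']]
        else
          acc ++ [[PySem.List.pyGetD s c ' ', PySem.List.pyGetD s (c+1) ' ',
                   PySem.List.pyGetD s (c+2) ' ']]
      else
        let c := m * 3 - 2
        if m == 0 then
          acc ++ [[PySem.List.pyGetD s 0 ' ']]
        else
          acc ++ [[PySem.List.pyGetD s c ' ', PySem.List.pyGetD s (c+1) ' ',
                   PySem.List.pyGetD s (c+2) ' ']]) []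

def transformarMonto (montoDR : String) : String :=
  let listaMontoDR := PySem.Chars.splitOn montoDR.toList ['.']
  let listaSM := listaMontoDR.getD 0 []          -- listaMontoDR[0]; split never returns []
  let listaSM3 := pvALoop listaSM
  let montoDR2 := PySem.Chars.join [','] listaSM3 ++ ['.'] ++ PySem.List.pyGetD listaMontoDR 1 []
  String.ofList ("Q. ".toList ++ montoDR2)

-- ===== PORT B =====
-- the while loop: collect s[max(0,i-3):i] for i = n, n-3, …; Nat subtraction i - 3 IS max(0, i-3)
def pvBLoop (s : List Char) (i : Nat) : List (List Char) :=
  if i = 0 then []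
  else PySem.List.slice s (some ((i - 3 : Nat) : Int)) (some (i : Int)) :: pvBLoop s (i - 3)

def transformarMonto_alt (montoDR : String) : String :=
  let listaMontoDR := PySem.Chars.splitOn montoDR.toList ['.']
  let s := listaMontoDR.getD 0 []                -- listaMontoDR[0]
  let groups := (pvBLoop s s.length).reverse
  String.ofList ("Q. ".toList ++ (PySem.Chars.join [','] groups ++ ['.'] ++ PySem.List.pyGetD listaMontoDR 1 []))

-- ===== PRECONDITION & SPEC =====
-- Pre_ excludes exactly the inputs with no '.', on which both Pythons raise IndexError (listaMontoDR[1]).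
def Pre_transformarMonto (montoDR : String) : Prop := '.' ∈ montoDR.toList
instance (montoDR : String) : Decidable (Pre_transformarMonto montoDR) := by unfold Pre_transformarMonto; infer_instance
def pvWitness_transformarMonto : String := "1234567.89"
def Spec_transformarMonto (montoDR : String) (out : String) : Prop := out = transformarMonto_alt montoDR
instance (montoDR : String) (out : String) : Decidable (Spec_transformarMonto montoDR out) := by unfold Spec_transformarMonto; infer_instance

-- ===== CLAIM (what is proved, stated in full; the proofs are below) =====
def Claim_equal_transformarMonto : Prop := ∀ (montoDR : String), Dom_transformarMonto montoDR → Pre_transformarMonto montoDR → Spec_transformarMonto montoDR (transformarMonto montoDR)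

-- ===== LEMMAS AND PROOFS =====

-- canonical right-chunking with offset t ∈ {0,1,2}: group k is s[3k-t : 3k+3-t] (Nat-clamped)
def pvChunk (s : List Char) (t k : Nat) : List Char :=
  (s.drop (3 * k - t)).take ((3 * k + 3 - t) - (3 * k - t))

-- A's loop body as a function of the loop index (proof-side only)
def pvABody (s : List Char) (m : Int) : List Char :=
  if s.length % 3 == 0 then
    [PySem.List.pyGetD s (m * 3) ' ', PySem.List.pyGetD s (m * 3 + 1) ' ',
     PySem.List.pyGetD s (m * 3 + 2) ' ']
  else if s.length % 3 == 2 then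
    if m == 0 then
      [PySem.List.pyGetD s 0 ' ', PySem.List.pyGetD s 1 ' ']
    else
      [PySem.List.pyGetD s (m * 3 - 1) ' ', PySem.List.pyGetD s (m * 3 - 1 + 1) ' ',
       PySem.List.pyGetD s (m * 3 - 1 + 2) ' ']
  else
    if m == 0 then
      [PySem.List.pyGetD s 0 ' ']
    else
      [PySem.List.pyGetD s (m * 3 - 2) ' ', PySem.List.pyGetD s (m * 3 - 2 + 1) ' ',
       PySem.List.pyGetD s (m * 3 - 2 + 2) ' ']

theorem pvALoop_eq_map (s : List Char) :
    pvALoop s = (List.range ((s.length + 2) / 3)).map (fun k : Nat => pvABody s (k : Int)) := by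
  unfold pvALoop
  have hbody : (fun (acc : List (List Char)) (m : Int) =>
      if s.length % 3 == 0 then
        let c := m * 3
        acc ++ [[PySem.List.pyGetD s c ' ', PySem.List.pyGetD s (c+1) ' ',
                 PySem.List.pyGetD s (c+2) ' ']]
      else if s.length % 3 == 2 then
        let c := m * 3 - 1
        if m == 0 then
          acc ++ [[PySem.List.pyGetD s 0 ' ', PySem.List.pyGetD s 1 ' ']]
        else
          acc ++ [[PySem.List.pyGetD s c ' ', PySem.List.pyGetD s (c+1) ' ',
                   PySem.List.pyGetD s (c+2) ' ']]
      else
        let c := m * 3 - 2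
        if m == 0 then
          acc ++ [[PySem.List.pyGetD s 0 ' ']]
        else
          acc ++ [[PySem.List.pyGetD s c ' ', PySem.List.pyGetD s (c+1) ' ',
                   PySem.List.pyGetD s (c+2) ' ']])
      = (fun acc m => acc ++ [pvABody s m]) := by
    funext acc m
    unfold pvABody
    split_ifs <;> rfl
  rw [hbody, PySem.List.foldl_append_singleton_eq_map, List.nil_append,
      PySem.List.pyRange_zero_natCast, List.map_map]
  rfl

theorem pvBLoop_eq (s : List Char) (t : Nat) (ht : t < 3) :
    ∀ q : Nat, (pvBLoop s (3 * q - t)).reverse = (List.range q).map (pvChunk s t) := by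
  intro q
  induction q with
  | zero => simp [pvBLoop]
  | succ q ih =>
      have h1 : 3 * (q + 1) - t ≠ 0 := by omega
      have h2 : 3 * (q + 1) - t - 3 = 3 * q - t := by omega
      rw [pvBLoop, if_neg h1, h2, List.reverse_cons, ih, List.range_succ, List.map_append,
          PySem.List.slice_natCast]
      have e : (3 * (q + 1) - t) - (3 * q - t) = (3 * q + 3 - t) - (3 * q - t) := by omega
      rw [List.map_singleton]
      simp only [pvChunk]
      rw [e]

-- three consecutive elements as a take-3 slice
theorem take3_eq (s : List Char) (j : Nat) (h : j + 3 ≤ s.length) :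
    (s.drop j).take 3 = [s.getD j ' ', s.getD (j+1) ' ', s.getD (j+2) ' '] := by
  have h0 : j < s.length := by omega
  have h1 : j + 1 < s.length := by omega
  have h2 : j + 2 < s.length := by omega
  rw [List.drop_eq_getElem_cons h0, List.drop_eq_getElem_cons h1, List.drop_eq_getElem_cons h2,
      List.getD_eq_getElem s ' ' h0, List.getD_eq_getElem s ' ' h1, List.getD_eq_getElem s ' ' h2]
  simp only [List.take_succ_cons, List.take_zero]

theorem take2_eq (s : List Char) (h : 2 ≤ s.length) :
    s.take 2 = [s.getD 0 ' ', s.getD 1 ' '] := by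
  have h0 : 0 < s.length := by omega
  have h1 : 1 < s.length := by omega
  rw [show s.take 2 = (s.drop 0).take 2 by simp]
  rw [List.drop_eq_getElem_cons h0, List.drop_eq_getElem_cons h1,
      List.getD_eq_getElem s ' ' h0, List.getD_eq_getElem s ' ' h1]
  simp only [List.take_succ_cons, List.take_zero]

theorem take1_eq (s : List Char) (h : 1 ≤ s.length) :
    s.take 1 = [s.getD 0 ' '] := by
  have h0 : 0 < s.length := by omega
  rw [show s.take 1 = (s.drop 0).take 1 by simp]
  rw [List.drop_eq_getElem_cons h0, List.getD_eq_getElem s ' ' h0]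
  simp only [List.take_succ_cons, List.take_zero]

theorem pvChunk_of_pos (s : List Char) (t k : Nat) (hk : 1 ≤ k) (ht : t < 3) :
    pvChunk s t k = (s.drop (3 * k - t)).take 3 := by
  unfold pvChunk; congr 1; omega

theorem pvABody_eq_chunk (s : List Char) (q t k : Nat) (hq : (s.length + 2) / 3 = q)
    (ht : 3 * q - s.length = t) (hn : s.length ≠ 0) (hk : k < q) :
    pvABody s (k : Int) = pvChunk s t k := by
  have hq1 : 1 ≤ q := by omega
  have ht3 : t < 3 := by omega
  have hns : s.length = 3 * q - t := by omega
  have hlen : 3 * k + 3 - t ≤ s.length := by omega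
  unfold pvABody
  by_cases h0 : s.length % 3 = 0
  · have ht0 : t = 0 := by omega
    rw [if_pos (by simp [h0])]
    have hc : (k : Int) * 3 = ((3 * k : Nat) : Int) := by push_cast; ring
    have hc1 : ((3 * k : Nat) : Int) + 1 = ((3 * k + 1 : Nat) : Int) := by push_cast; ring
    have hc2 : ((3 * k : Nat) : Int) + 2 = ((3 * k + 2 : Nat) : Int) := by push_cast; ring
    rw [hc, hc1, hc2]
    simp only [PySem.List.pyGetD_natCast]
    rw [pvChunk, ht0]
    simp only [Nat.sub_zero]
    rw [show 3 * k + 3 - 3 * k = 3 by omega, take3_eq s (3 * k) (by omega)]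
  · by_cases h2 : s.length % 3 = 2
    · have ht1 : t = 1 := by omega
      rw [if_neg (by simp [h0]), if_pos (by simp [h2])]
      by_cases hk0 : k = 0
      · subst hk0
        rw [if_pos (by decide)]
        rw [pvChunk, ht1]
        rw [show 3 * 0 - 1 = 0 by omega, show (3 * 0 + 3 - 1) - 0 = 2 by omega]
        rw [List.drop_zero, take2_eq s (by omega)]
        rw [show (0 : Int) = ((0 : Nat) : Int) by norm_cast, PySem.List.pyGetD_natCast,
            show (1 : Int) = ((1 : Nat) : Int) by norm_cast, PySem.List.pyGetD_natCast]
      · have hk1 : 1 ≤ k := by omega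
        rw [if_neg (by simp [hk0])]
        have hle : (1 : Nat) ≤ 3 * k := by omega
        have hc : (k : Int) * 3 - 1 = ((3 * k - 1 : Nat) : Int) := by push_cast [hle]; ring
        have hc1 : ((3 * k - 1 : Nat) : Int) + 1 = ((3 * k - 1 + 1 : Nat) : Int) := by push_cast; ring
        have hc2 : ((3 * k - 1 : Nat) : Int) + 2 = ((3 * k - 1 + 2 : Nat) : Int) := by push_cast; ring
        rw [hc, hc1, hc2]
        simp only [PySem.List.pyGetD_natCast]
        rw [pvChunk_of_pos s t k hk1 ht3, ht1, take3_eq s (3 * k - 1) (by omega)]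
    · have h1 : s.length % 3 = 1 := by omega
      have ht2 : t = 2 := by omega
      rw [if_neg (by simp [h0]), if_neg (by simp [h2])]
      by_cases hk0 : k = 0
      · subst hk0
        rw [if_pos (by decide)]
        rw [pvChunk, ht2]
        rw [show 3 * 0 - 2 = 0 by omega, show (3 * 0 + 3 - 2) - 0 = 1 by omega]
        rw [List.drop_zero, take1_eq s (by omega)]
        rw [show (0 : Int) = ((0 : Nat) : Int) by norm_cast, PySem.List.pyGetD_natCast]
      · have hk1 : 1 ≤ k := by omega
        rw [if_neg (by simp [hk0])]
        have hle : (2 : Nat) ≤ 3 * k := by omega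
        have hc : (k : Int) * 3 - 2 = ((3 * k - 2 : Nat) : Int) := by push_cast [hle]; ring
        have hc1 : ((3 * k - 2 : Nat) : Int) + 1 = ((3 * k - 2 + 1 : Nat) : Int) := by push_cast; ring
        have hc2 : ((3 * k - 2 : Nat) : Int) + 2 = ((3 * k - 2 + 2 : Nat) : Int) := by push_cast; ring
        rw [hc, hc1, hc2]
        simp only [PySem.List.pyGetD_natCast]
        rw [pvChunk_of_pos s t k hk1 ht3, ht2, take3_eq s (3 * k - 2) (by omega)]

-- the core: A's group list equals B's group list, for any char list s
theorem groups_eq (s : List Char) : pvALoop s = (pvBLoop s s.length).reverse := by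
  rw [pvALoop_eq_map]
  by_cases hzero : s.length = 0
  · rw [hzero]
    simp [pvBLoop]
  · obtain ⟨q, hq⟩ : ∃ q, (s.length + 2) / 3 = q := ⟨_, rfl⟩
    obtain ⟨t, ht⟩ : ∃ t, 3 * q - s.length = t := ⟨_, rfl⟩
    have ht3 : t < 3 := by omega
    have hns : s.length = 3 * q - t := by omega
    rw [hq, hns, pvBLoop_eq s t ht3 q]
    apply List.map_congr_left
    intro k hk
    exact pvABody_eq_chunk s q t k hq ht hzero (List.mem_range.mp hk)

-- ===== VERDICT (by name: the statement is the Claim_ definition above) =====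
theorem transformarMonto_spec : Claim_equal_transformarMonto := by
  intro montoDR _ _
  unfold Spec_transformarMonto transformarMonto transformarMonto_alt
  simp only [groups_eq]
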